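-- pv_equiv track=rewrite | github.com/LinusInnovator/brief-delights | execution/detect_contrarian.py | detect_topic_signals
-- ===== SOURCE A (Python) =====
-- from collections import defaultdict, Counter
-- from typing import Dict, List, Tuple, Optional
--
-- TOPIC_CLUSTERS = {
--     'ai_replaces_jobs': [
--         'replace', 'automate', 'job loss', 'layoffs', 'workforce reduction',
--         'ai taking', 'obsolete', 'displacement', 'restructuring'
--     ],
--     'ai_augments_humans': [
--         'augment', 'assist', 'copilot', 'pair', 'enhance', 'productivity',
--         'human-in-the-loop', 'collaboration', 'empower'
--     ],
--     'open_source_winning': [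
--         'open source', 'open-source', 'hugging face', 'llama', 'mistral',
--         'open weights', 'community', 'democratize'
--     ],
--     'closed_models_better': [
--         'gpt-4', 'claude', 'proprietary', 'enterprise', 'api',
--         'performance gap', 'benchmark', 'state-of-the-art'
--     ],
--     'ai_bubble': [
--         'bubble', 'overvalued', 'hype', 'overhyped', 'correction',
--         'downturn', 'unsustainable', 'warning'
--     ],
--     'ai_boom': [
--         'boom', 'growth', 'investment', 'funding', 'revenue',
--         'adoption', 'scaling', 'trillion', 'opportunity'
--     ],
--     'regulation_needed': [
--         'regulation', 'regulate', 'safety', 'alignment', 'guardrails',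
--         'compliance', 'oversight', 'responsible', 'ethics'
--     ],
--     'regulation_stifles': [
--         'innovation', 'freedom', 'overregulation', 'competition',
--         'bureaucracy', 'slow', 'barrier'
--     ],
--     'cloud_dominance': [
--         'aws', 'azure', 'gcp', 'cloud', 'hyperscaler',
--         'cloud-native', 'serverless', 'managed service'
--     ],
--     'self_host_movement': [
--         'self-host', 'on-premise', 'sovereignty', 'data control',
--         'local', 'edge', 'privacy', 'self-managed'
--     ],
-- }
--
-- def detect_topic_signals(articles: List[Dict]) -> Dict[str, List[Dict]]:
--     """
--     Tag each article with topic signals based on keyword matching.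
--     Returns dict: topic_name -> list of matching articles
--     """
--     topic_matches = defaultdict(list)
--
--     for article in articles:
--         text = (
--             article.get('title', '') + ' ' +
--             article.get('summary', '') + ' ' +
--             article.get('description', '') + ' ' +
--             article.get('key_takeaway', '') + ' ' +
--             article.get('why_this_matters', '')
--         ).lower()
--
--         for topic, keywords in TOPIC_CLUSTERS.items():
--             if any(kw in text for kw in keywords):
--                 topic_matches[topic].append(article)
--
--     return topic_matches
-- ===== SOURCE B (Python) =====
-- from collections import defaultdict
--
-- TOPIC_CLUSTERS = {
--     'ai_replaces_jobs': [
--         'replace', 'automate', 'job loss', 'layoffs', 'workforce reduction',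
--         'ai taking', 'obsolete', 'displacement', 'restructuring'
--     ],
--     'ai_augments_humans': [
--         'augment', 'assist', 'copilot', 'pair', 'enhance', 'productivity',
--         'human-in-the-loop', 'collaboration', 'empower'
--     ],
--     'open_source_winning': [
--         'open source', 'open-source', 'hugging face', 'llama', 'mistral',
--         'open weights', 'community', 'democratize'
--     ],
--     'closed_models_better': [
--         'gpt-4', 'claude', 'proprietary', 'enterprise', 'api',
--         'performance gap', 'benchmark', 'state-of-the-art'
--     ],
--     'ai_bubble': [
--         'bubble', 'overvalued', 'hype', 'overhyped', 'correction',
--         'downturn', 'unsustainable', 'warning'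
--     ],
--     'ai_boom': [
--         'boom', 'growth', 'investment', 'funding', 'revenue',
--         'adoption', 'scaling', 'trillion', 'opportunity'
--     ],
--     'regulation_needed': [
--         'regulation', 'regulate', 'safety', 'alignment', 'guardrails',
--         'compliance', 'oversight', 'responsible', 'ethics'
--     ],
--     'regulation_stifles': [
--         'innovation', 'freedom', 'overregulation', 'competition',
--         'bureaucracy', 'slow', 'barrier'
--     ],
--     'cloud_dominance': [
--         'aws', 'azure', 'gcp', 'cloud', 'hyperscaler',
--         'cloud-native', 'serverless', 'managed service'
--     ],
--     'self_host_movement': [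
--         'self-host', 'on-premise', 'sovereignty', 'data control',
--         'local', 'edge', 'privacy', 'self-managed'
--     ],
-- }
--
-- # Reverse index built once: keyword -> topics containing it.
-- _KEYWORD_INDEX = defaultdict(list)
-- for _topic, _keywords in TOPIC_CLUSTERS.items():
--     for _kw in _keywords:
--         _KEYWORD_INDEX[_kw].append(_topic)
--
--
-- def _article_text(article):
--     return (
--         article.get('title', '') + ' ' +
--         article.get('summary', '') + ' ' +
--         article.get('description', '') + ' ' +
--         article.get('key_takeaway', '') + ' ' +
--         article.get('why_this_matters', '')
--     ).lower()
--
--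
-- def _matched_topics(article):
--     """Topics matching this article, in TOPIC_CLUSTERS order, no duplicates."""
--     text = _article_text(article)
--     matched = set()
--     for kw, topics in _KEYWORD_INDEX.items():
--         if kw in text:
--             matched.update(topics)
--     return [t for t in TOPIC_CLUSTERS if t in matched]
--
--
-- def detect_topic_signals(articles):
--     # Stage 1: tag every article with its matched topic list.
--     tagged = [(a, _matched_topics(a)) for a in articles]
--     # Stage 2: group the tagged articles by topic.
--     topic_matches = defaultdict(list)
--     for a, topics in tagged:
--         for t in topics:
--             topic_matches[t].append(a)
--     return topic_matches
-- ===== Notes on version B (the rewrite author's own statement) =====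
-- stated objective: alternative
-- what changed: B is a staged pipeline: it precomputes a reverse keyword->topics index once, first maps every article to its matched-topic list (via a per-article set collected from the index), then groups the tagged articles into the result dict by iterating only the matched topics, instead of A's single nested loop testing any() over every topic's keyword list per article.
import Mathlib
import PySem

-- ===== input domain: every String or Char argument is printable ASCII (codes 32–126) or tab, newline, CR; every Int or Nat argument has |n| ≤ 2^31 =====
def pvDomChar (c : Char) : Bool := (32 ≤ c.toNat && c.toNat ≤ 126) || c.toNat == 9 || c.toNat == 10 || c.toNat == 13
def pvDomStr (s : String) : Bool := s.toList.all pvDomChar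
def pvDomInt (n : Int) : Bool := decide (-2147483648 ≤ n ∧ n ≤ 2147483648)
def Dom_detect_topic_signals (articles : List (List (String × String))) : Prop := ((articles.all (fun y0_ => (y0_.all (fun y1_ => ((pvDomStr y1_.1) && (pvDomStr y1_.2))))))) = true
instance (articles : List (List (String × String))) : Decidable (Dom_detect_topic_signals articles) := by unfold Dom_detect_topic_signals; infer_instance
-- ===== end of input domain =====

-- B is a staged pipeline (reverse keyword index built once, articles tagged with
-- their matched-topic lists first, then grouped by topic) instead of A's single
-- nested loop; objective: alternative decomposition, same asymptotic cost.

-- ===== PORT A =====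
-- TOPIC_CLUSTERS (module constant, shared context of both programs)
def pvClusters : List (String × List String) := [
  ("ai_replaces_jobs", ["replace", "automate", "job loss", "layoffs", "workforce reduction", "ai taking", "obsolete", "displacement", "restructuring"]),
  ("ai_augments_humans", ["augment", "assist", "copilot", "pair", "enhance", "productivity", "human-in-the-loop", "collaboration", "empower"]),
  ("open_source_winning", ["open source", "open-source", "hugging face", "llama", "mistral", "open weights", "community", "democratize"]),
  ("closed_models_better", ["gpt-4", "claude", "proprietary", "enterprise", "api", "performance gap", "benchmark", "state-of-the-art"]),
  ("ai_bubble", ["bubble", "overvalued", "hype", "overhyped", "correction", "downturn", "unsustainable", "warning"]),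
  ("ai_boom", ["boom", "growth", "investment", "funding", "revenue", "adoption", "scaling", "trillion", "opportunity"]),
  ("regulation_needed", ["regulation", "regulate", "safety", "alignment", "guardrails", "compliance", "oversight", "responsible", "ethics"]),
  ("regulation_stifles", ["innovation", "freedom", "overregulation", "competition", "bureaucracy", "slow", "barrier"]),
  ("cloud_dominance", ["aws", "azure", "gcp", "cloud", "hyperscaler", "cloud-native", "serverless", "managed service"]),
  ("self_host_movement", ["self-host", "on-premise", "sovereignty", "data control", "local", "edge", "privacy", "self-managed"])
]

-- A: one nested loop; per article the lowered joined text is built inline and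
-- every topic's keyword list is tested with any(); matches appended immediately.
def detect_topic_signals (articles : List (List (String × String))) : List (String × List (List (String × String))) :=
  (articles.foldl (fun topic_matches article =>
    let text : List Char := PySem.Chars.lower
      (((PySem.Dict.mk article).getD "title" "").toList ++ [' '] ++
       ((PySem.Dict.mk article).getD "summary" "").toList ++ [' '] ++
       ((PySem.Dict.mk article).getD "description" "").toList ++ [' '] ++
       ((PySem.Dict.mk article).getD "key_takeaway" "").toList ++ [' '] ++
       ((PySem.Dict.mk article).getD "why_this_matters" "").toList)
    pvClusters.foldl (fun topic_matches p =>
      if p.2.any (fun kw => PySem.Chars.isIn kw.toList text) then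
        topic_matches.insert p.1 (topic_matches.getD p.1 [] ++ [article])
      else topic_matches) topic_matches)
    PySem.Dict.empty).items

-- ===== PORT B =====
-- reverse index built once: keyword -> list of topics containing it (Source B's _KEYWORD_INDEX)
def pvIndex : PySem.Dict String (List String) :=
  pvClusters.foldl (fun ix p =>
    p.2.foldl (fun ix kw => ix.insert kw (ix.getD kw [] ++ [p.1])) ix) PySem.Dict.empty

-- Source B's _article_text
def pvArticleText (article : List (String × String)) : List Char :=
  PySem.Chars.lower
    (((PySem.Dict.mk article).getD "title" "").toList ++ [' '] ++
     ((PySem.Dict.mk article).getD "summary" "").toList ++ [' '] ++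
     ((PySem.Dict.mk article).getD "description" "").toList ++ [' '] ++
     ((PySem.Dict.mk article).getD "key_takeaway" "").toList ++ [' '] ++
     ((PySem.Dict.mk article).getD "why_this_matters" "").toList)

-- Source B's _matched_topics: matched set collected from the reverse index, then
-- the topics listed in TOPIC_CLUSTERS order
def pvMatchedTopics (article : List (String × String)) : List String :=
  let text := pvArticleText article
  let matched : PySem.Set String :=
    pvIndex.items.foldl (fun m q =>
      if PySem.Chars.isIn q.1.toList text then PySem.Set.update m q.2 else m)
      PySem.Set.empty
  (pvClusters.map Prod.fst).filter (fun t => PySem.Set.contains matched t)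

def detect_topic_signals_alt (articles : List (List (String × String))) : List (String × List (List (String × String))) :=
  let tagged := articles.map (fun a => (a, pvMatchedTopics a))
  (tagged.foldl (fun topic_matches pr =>
      pr.2.foldl (fun topic_matches t =>
        topic_matches.insert t (topic_matches.getD t [] ++ [pr.1])) topic_matches)
    PySem.Dict.empty).items

-- ===== PRECONDITION & SPEC =====
def Spec_detect_topic_signals (articles : List (List (String × String))) (out : List (String × List (List (String × String)))) : Prop := out = detect_topic_signals_alt articles
instance (articles : List (List (String × String))) (out : List (String × List (List (String × String)))) : Decidable (Spec_detect_topic_signals articles out) := by unfold Spec_detect_topic_signals; infer_instance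

-- ===== CLAIM (what is proved, stated in full; the proofs are below) =====
def Claim_equal_detect_topic_signals : Prop := ∀ (articles : List (List (String × String))), Dom_detect_topic_signals articles → Spec_detect_topic_signals articles (detect_topic_signals articles)

-- ===== LEMMAS AND PROOFS =====

-- the reverse index, computed: one entry per keyword, each mapping to its (unique) topic
set_option maxRecDepth 40000 in
theorem pvIndex_items_eq :
    pvIndex.items = pvClusters.flatMap (fun p => p.2.map (fun kw => (kw, [p.1]))) := by
  decide

set_option maxRecDepth 10000 in
theorem pvClusters_keys_nodup : (pvClusters.map Prod.fst).Nodup := by decide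

-- generic: membership in B's matched-set fold
theorem mem_matched_foldl (l : List (String × List String)) (P : String → Bool)
    (s : PySem.Set String) (t : String) :
    t ∈ l.foldl (fun m q => if P q.1 then PySem.Set.update m q.2 else m) s ↔
      t ∈ s ∨ ∃ q ∈ l, P q.1 = true ∧ t ∈ q.2 := by
  induction l generalizing s with
  | nil => simp
  | cons q l ih =>
    simp only [List.foldl_cons]
    by_cases h : P q.1 = true
    · rw [if_pos h, ih]
      simp [PySem.Set.mem_update, h, or_assoc]
    · rw [if_neg h, ih]
      simp only [List.mem_cons]
      constructor
      · rintro (hs | ⟨q', hq', hP, ht⟩)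
        · exact Or.inl hs
        · exact Or.inr ⟨q', Or.inr hq', hP, ht⟩
      · rintro (hs | ⟨q', (rfl | hq'), hP, ht⟩)
        · exact Or.inl hs
        · exact absurd hP h
        · exact Or.inr ⟨q', hq', hP, ht⟩

-- uniqueness of a key in an association list with Nodup keys
theorem snd_eq_of_nodup_keys {α β : Type} (l : List (α × β)) (h : (l.map Prod.fst).Nodup)
    {p q : α × β} (hp : p ∈ l) (hq : q ∈ l) (hf : p.1 = q.1) : p = q := by
  induction l with
  | nil => cases hp
  | cons r l ih =>
    simp only [List.map_cons, List.nodup_cons] at h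
    rcases List.mem_cons.mp hp with rfl | hp' <;> rcases List.mem_cons.mp hq with rfl | hq'
    · rfl
    · exact absurd (hf ▸ List.mem_map_of_mem hq') h.1
    · exact absurd (hf ▸ List.mem_map_of_mem hp') h.1
    · exact ih h.2 hp' hq'

-- per topic-cluster entry: A's any() test equals B's matched-set membership
theorem cond_eq (text : List Char) (p : String × List String) (hp : p ∈ pvClusters) :
    p.2.any (fun kw => PySem.Chars.isIn kw.toList text) =
      PySem.Set.contains
        (pvIndex.items.foldl (fun m q =>
          if PySem.Chars.isIn q.1.toList text then PySem.Set.update m q.2 else m)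
          PySem.Set.empty) p.1 := by
  have key : PySem.Set.contains
        (pvIndex.items.foldl (fun m q =>
          if PySem.Chars.isIn q.1.toList text then PySem.Set.update m q.2 else m)
          PySem.Set.empty) p.1 = true ↔
      ∃ kw ∈ p.2, PySem.Chars.isIn kw.toList text = true := by
    rw [PySem.Set.contains_iff, pvIndex_items_eq,
      mem_matched_foldl _ (fun k => PySem.Chars.isIn k.toList text)]
    simp only [PySem.Set.empty, List.not_mem_nil, false_or, List.mem_flatMap, List.mem_map]
    constructor
    · rintro ⟨q, ⟨p', hp', kw, hkw, rfl⟩, hIn, ht⟩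
      simp only [List.mem_singleton] at ht
      obtain rfl := snd_eq_of_nodup_keys pvClusters pvClusters_keys_nodup hp hp' ht
      exact ⟨kw, hkw, hIn⟩
    · rintro ⟨kw, hkw, hIn⟩
      exact ⟨(kw, [p.1]), ⟨p, hp, kw, hkw, rfl⟩, hIn, List.mem_singleton_self _⟩
  rcases Bool.eq_false_or_eq_true (PySem.Set.contains
        (pvIndex.items.foldl (fun m q =>
          if PySem.Chars.isIn q.1.toList text then PySem.Set.update m q.2 else m)
          PySem.Set.empty) p.1) with hc | hc
  · rw [hc]
    exact List.any_eq_true.mpr (key.mp hc)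
  · rw [hc, List.any_eq_false]
    rw [hc] at key
    simp only [Bool.false_eq_true, false_iff] at key
    push Not at key
    intro kw hkw hIn
    exact absurd hIn (by simpa using key kw hkw)

-- a guarded fold over an association list equals an unguarded fold over its filtered keys
theorem foldl_guard_eq_foldl_filter {α β δ : Type} (l : List (α × β)) (P : α → Bool)
    (g : δ → α → δ) (d : δ) :
    l.foldl (fun d p => if P p.1 then g d p.1 else d) d =
      ((l.map Prod.fst).filter P).foldl g d := by
  induction l generalizing d with
  | nil => rfl
  | cons q l ih =>
    simp only [List.foldl_cons, List.map_cons, List.filter_cons]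
    by_cases h : P q.1 = true
    · rw [if_pos h, if_pos h, List.foldl_cons, ih]
    · rw [if_neg h, if_neg h, ih]

-- ===== VERDICT (by name: the statement is the Claim_ definition above) =====
theorem detect_topic_signals_spec : Claim_equal_detect_topic_signals := by
  intro articles _
  unfold Spec_detect_topic_signals detect_topic_signals detect_topic_signals_alt
  refine congrArg PySem.Dict.items ?_
  rw [List.foldl_map]
  apply PySem.List.foldl_congr_mem
  intro acc article _
  dsimp only [pvMatchedTopics]
  rw [← foldl_guard_eq_foldl_filter pvClusters
        (fun t => PySem.Set.contains
          (pvIndex.items.foldl (fun m q =>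
            if PySem.Chars.isIn q.1.toList (pvArticleText article) then PySem.Set.update m q.2 else m)
            PySem.Set.empty) t)
        (fun tm t => tm.insert t (tm.getD t [] ++ [article])) acc]
  apply PySem.List.foldl_congr_mem
  intro d p hp
  rw [show PySem.Chars.lower
      (((PySem.Dict.mk article).getD "title" "").toList ++ [' '] ++
       ((PySem.Dict.mk article).getD "summary" "").toList ++ [' '] ++
       ((PySem.Dict.mk article).getD "description" "").toList ++ [' '] ++
       ((PySem.Dict.mk article).getD "key_takeaway" "").toList ++ [' '] ++
       ((PySem.Dict.mk article).getD "why_this_matters" "").toList) = pvArticleText article from rfl,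
     cond_eq (pvArticleText article) p hp]
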